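-- pv_equiv track=rewrite | github.com/shuvoxcd01/Eight-Queen-with-UCS | 8 Queen (problem solving agent).py | check_if_attacked
-- ===== SOURCE A (Python) =====
-- def check_if_attacked(state):  # returns True if attacked
--     try:
--         index = state.index(None) - 1
--     except ValueError:
--         index = 7
--
--     if index == 0:
--         return False
--
--     for i in range(0,index):
--         if (state[i][0] == state[index][0]) or (state[i][1] == state[index][1]):
--             return True  #row and column attack check
--         if abs(ord(state[i][0]) - ord(state[index][0])) == abs(int(state[i][1]) - int(state[index][1])):
--             return True #diagonal attack detect
--     return False
-- ===== SOURCE B (Python) =====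
-- def check_if_attacked(state):  # returns True if attacked
--     placed = state[:state.index(None)] if None in state else state[:8]
--     if len(placed) < 2:
--         return False
--     cols = [c for c, _ in placed]
--     rows = [r for _, r in placed]
--     sums = [ord(c) + int(r) for c, r in placed]
--     diffs = [ord(c) - int(r) for c, r in placed]
--     return (cols.count(cols[-1]) > 1 or rows.count(rows[-1]) > 1
--             or sums.count(sums[-1]) > 1 or diffs.count(diffs[-1]) > 1)
-- ===== Notes on version B (the rewrite author's own statement) =====
-- stated objective: alternative
-- what changed: Replaces A's compare-each-prior-queen-to-the-last loop with early return by a duplicate-count formulation: B slices off the placed prefix (through the last queen), projects it into four key lists (columns, raw rows, ord+int and ord-int diagonal keys), and declares attack iff the last queen's key occurs more than once in any list, so no element is ever compared with another. …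
-- outside the precondition, e.g. on check_if_attacked([('a', '1'), ('a', 'x'), None]): A returns True, B raises ValueError
import Mathlib
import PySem

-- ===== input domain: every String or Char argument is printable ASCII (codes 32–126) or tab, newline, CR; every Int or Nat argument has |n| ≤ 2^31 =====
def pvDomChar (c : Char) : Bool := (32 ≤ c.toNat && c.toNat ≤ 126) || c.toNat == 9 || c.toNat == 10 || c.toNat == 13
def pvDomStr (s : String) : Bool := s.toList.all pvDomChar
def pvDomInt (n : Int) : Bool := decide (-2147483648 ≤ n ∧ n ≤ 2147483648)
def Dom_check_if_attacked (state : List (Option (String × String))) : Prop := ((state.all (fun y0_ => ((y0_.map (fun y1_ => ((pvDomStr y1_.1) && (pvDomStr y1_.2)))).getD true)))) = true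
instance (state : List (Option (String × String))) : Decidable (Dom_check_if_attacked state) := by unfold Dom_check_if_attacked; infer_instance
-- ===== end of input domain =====

-- B replaces A's compare-each-prior-to-the-last loop (early return) by a duplicate-count
-- formulation: project the placed prefix into four key lists and declare attack iff the
-- last queen's key occurs more than once in one of them (alternative decomposition, same O(n)).


-- shared primitive helpers (Python built-ins both sources call)
-- ord(s): exact for length-1 strings, which Pre_ guarantees for every accessed column
def pvOrd (s : String) : Int := ((s.toList.headD ' ').toNat : Int)
-- int(s): Pre_ guarantees ofStr? is some for every accessed row
def pvIntOf (s : String) : Int := (PySem.Int.ofStr? s).getD 0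
-- state[i]: Pre_ guarantees the index is in range and the entry is not None
def pvPairAt (state : List (Option (String × String))) (i : Int) : String × String :=
  ((PySem.List.pyGet? state i).getD none).getD ("", "")

-- ===== PORT A =====
-- index = state.index(None) - 1, or 7 on ValueError
def pvIndex (state : List (Option (String × String))) : Int :=
  match PySem.List.index? state none with
  | some k => (k : Int) - 1
  | none => 7

def pvALoop (state : List (Option (String × String))) (idx : Int) : List Int → Bool
  | [] => false
  | i :: rest =>
    let si := pvPairAt state i
    let sx := pvPairAt state idx
    if si.1 == sx.1 || si.2 == sx.2 then true
    else if (pvOrd si.1 - pvOrd sx.1).natAbs == (pvIntOf si.2 - pvIntOf sx.2).natAbs then true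
    else pvALoop state idx rest

def check_if_attacked (state : List (Option (String × String))) : Bool :=
  let index := pvIndex state
  if index == 0 then false
  else pvALoop state index (PySem.List.pyRange 0 index 1)

-- ===== PORT B =====
-- destructuring '(c, r)' of an entry; on the inputs B reads, entries are never None,
-- so the getD default is unreachable (Python would raise TypeError there)
def pvPair (e : Option (String × String)) : String × String := e.getD ("", "")

def check_if_attacked_alt (state : List (Option (String × String))) : Bool :=
  -- placed = state[:state.index(None)] if None in state else state[:8]
  -- (a slice with a nonnegative upper bound is List.take: exact)
  let placed := match PySem.List.index? state none with
    | some k => state.take k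
    | none => state.take 8
  if placed.length < 2 then false
  else
    let cols := placed.map (fun e => (pvPair e).1)
    let rows := placed.map (fun e => (pvPair e).2)
    let sums := placed.map (fun e => pvOrd (pvPair e).1 + pvIntOf (pvPair e).2)
    let diffs := placed.map (fun e => pvOrd (pvPair e).1 - pvIntOf (pvPair e).2)
    decide (1 < PySem.List.count cols ((PySem.List.pyGet? cols (-1)).getD ""))
    || decide (1 < PySem.List.count rows ((PySem.List.pyGet? rows (-1)).getD ""))
    || decide (1 < PySem.List.count sums ((PySem.List.pyGet? sums (-1)).getD 0))
    || decide (1 < PySem.List.count diffs ((PySem.List.pyGet? diffs (-1)).getD 0))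

-- ===== PRECONDITION & SPEC =====
-- an entry both programs may read: present, single-character column, int()-parseable row
def pvOkEntry (e : Option (String × String)) : Bool :=
  match e with
  | none => false
  | some p => p.1.toList.length == 1 && (PySem.Int.ofStr? p.2).isSome

-- Pre_ admits: index ≤ 0 (both return False at once), or index in range with every entry
-- up to index well-formed.  This excludes some inputs on which A still RETURNS True: A's
-- early return on a column/row string match can fire before a later malformed field is
-- read, while B parses every inspected field up front and raises there (see cites).
def Pre_check_if_attacked (state : List (Option (String × String))) : Prop :=
  pvIndex state ≤ 0 ∨
    ((pvIndex state).toNat < state.length ∧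
      ∀ i ≤ (pvIndex state).toNat, pvOkEntry (state.getD i none) = true)
instance (state : List (Option (String × String))) : Decidable (Pre_check_if_attacked state) := by
  unfold Pre_check_if_attacked; infer_instance

def pvWitness_check_if_attacked : (List (Option (String × String))) :=
  [some ("a", "1"), some ("c", "2"), none]

def Spec_check_if_attacked (state : List (Option (String × String))) (out : Bool) : Prop := out = check_if_attacked_alt state
instance (state : List (Option (String × String))) (out : Bool) : Decidable (Spec_check_if_attacked state out) := by unfold Spec_check_if_attacked; infer_instance

-- ===== CLAIM =====
def Claim_equal_check_if_attacked : Prop := ∀ (state : List (Option (String × String))), Dom_check_if_attacked state → Pre_check_if_attacked state → Spec_check_if_attacked state (check_if_attacked state)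

-- ===== LEMMAS AND PROOFS =====

-- A's loop body as a per-index predicate
def pvHit (state : List (Option (String × String))) (idx i : Int) : Bool :=
  ((pvPairAt state i).1 == (pvPairAt state idx).1 || (pvPairAt state i).2 == (pvPairAt state idx).2)
  || ((pvOrd (pvPairAt state i).1 - pvOrd (pvPairAt state idx).1).natAbs
        == (pvIntOf (pvPairAt state i).2 - pvIntOf (pvPairAt state idx).2).natAbs)

theorem pvALoop_eq_any (state : List (Option (String × String))) (idx : Int) (l : List Int) :
    pvALoop state idx l = l.any (pvHit state idx) := by
  induction l with
  | nil => rfl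
  | cons i rest ih =>
    simp only [pvALoop, pvHit, List.any_cons, ← ih]
    split_ifs with h1 h2 <;> simp_all

theorem pv_take_mem (l : List (Option (String × String))) (n : Nat) (h : n ≤ l.length)
    (b : Option (String × String)) :
    b ∈ l.take n ↔ ∃ i, ∃ _ : i < n, l[i]'(by omega) = b := by
  constructor
  · intro hb
    obtain ⟨i, hi, he⟩ := List.getElem_of_mem hb
    exact ⟨i, by simp at hi; omega, by simpa using he⟩
  · rintro ⟨i, hi, rfl⟩
    exact List.mem_take_iff_getElem.mpr ⟨i, by simp; omega, by simp⟩

-- pvPairAt at a valid nonnegative index is getElem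
theorem pvPairAt_of_lt (state : List (Option (String × String))) (k : Nat) (h : k < state.length) :
    pvPairAt state (k : Int) = (state[k]'h).getD ("", "") := by
  unfold pvPairAt
  rw [PySem.List.pyGet?_of_nonneg state (by omega : (0:Int) ≤ (k:Int))]
  simp [List.getElem?_eq_getElem h]

-- 'count (xs ++ [x]) x > 1' is 'x occurs in xs'
theorem pv_count_append_gt_one {α : Type} [BEq α] [LawfulBEq α] (xs : List α) (x : α) :
    (1 < (xs ++ [x]).count x) ↔ x ∈ xs := by
  rw [List.count_append]
  simp [List.count_pos_iff]

theorem pvIndex_some (state : List (Option (String × String))) (k : Nat)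
    (h : PySem.List.index? state none = some k) : pvIndex state = (k : Int) - 1 := by
  unfold pvIndex; rw [h]

theorem pvIndex_none (state : List (Option (String × String)))
    (h : PySem.List.index? state none = none) : pvIndex state = 7 := by
  unfold pvIndex; rw [h]

theorem check_if_attacked_spec : Claim_equal_check_if_attacked := by
  intro state _ hpre
  unfold Spec_check_if_attacked
  by_cases hle : pvIndex state ≤ 0
  · -- index ≤ 0: A returns False (idx=0 guard or empty range), B's placed prefix has < 2 entries
    have hA : check_if_attacked state = false := by
      unfold check_if_attacked
      by_cases h0 : pvIndex state = 0
      · simp [h0]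
      · have hr : PySem.List.pyRange 0 (pvIndex state) 1 = [] := by
          rw [PySem.List.pyRange_one]
          simp only [List.map_eq_nil_iff, List.range_eq_nil]
          omega
        simp [h0, hr, pvALoop]
    have hB : check_if_attacked_alt state = false := by
      unfold check_if_attacked_alt
      cases hk : PySem.List.index? state none with
      | some k =>
        have hki := pvIndex_some state k hk
        have hlen : (state.take k).length < 2 := by
          simp only [List.length_take]; omega
        show (let placed := match PySem.List.index? state none with
          | some k => state.take k | none => state.take 8
          ; _) = false
        rw [hk]
        exact if_pos hlen
      | none =>
        have := pvIndex_none state hk; omega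
    rw [hA, hB]
  · push Not at hle
    rcases hpre with h | ⟨hlt, hok⟩
    · omega
    set idx := pvIndex state with hidx
    set n := idx.toNat with hn
    have hcast : (n : Int) = idx := by omega
    have hn1 : 1 ≤ n := by omega
    -- B's placed prefix is state.take (n+1) in both branches of index?
    have hplaced : (match PySem.List.index? state none with
        | some k => state.take k | none => state.take 8) = state.take (n + 1) := by
      cases hk : PySem.List.index? state none with
      | some k =>
        have := pvIndex_some state k hk
        simp only; congr 1; omega
      | none =>
        have := pvIndex_none state hk
        simp only; congr 1; omega
    have hne0 : ¬ (idx == 0) = true := by simp; omega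
    have hlen : (state.take (n + 1)).length = n + 1 := by
      simp only [List.length_take]; omega
    have hlen2 : ¬ (state.take (n + 1)).length < 2 := by omega
    unfold check_if_attacked check_if_attacked_alt
    rw [← hidx, hplaced, if_neg hne0, if_neg hlen2]
    -- queen entry
    have hqok := hok n le_rfl
    rw [List.getD_eq_getElem state none hlt] at hqok
    obtain ⟨q, hq⟩ : ∃ q, state[n]'hlt = some q := by
      cases hsq : state[n]'hlt with
      | none => rw [hsq] at hqok; simp [pvOkEntry] at hqok
      | some q => exact ⟨q, rfl⟩
    have hqat : pvPairAt state idx = q := by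
      rw [← hcast, pvPairAt_of_lt state n hlt, hq]; rfl
    -- prefix entries
    have hpok : ∀ i (hi : i < n), ∃ p, state[i]'(by omega) = some p ∧
        pvPairAt state (i : Int) = p := by
      intro i hi
      have h1 := hok i (by omega)
      rw [List.getD_eq_getElem state none (by omega)] at h1
      cases hsi : state[i]'(by omega : i < state.length) with
      | none => rw [hsi] at h1; simp [pvOkEntry] at h1
      | some p =>
        exact ⟨p, rfl, by rw [pvPairAt_of_lt state i (by omega), hsi]; rfl⟩
    -- split the placed prefix as (take n) ++ [last queen]
    have htake : state.take (n + 1) = state.take n ++ [state[n]'hlt] := by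
      rw [List.take_add_one, List.getElem?_eq_getElem hlt]; rfl
    rw [pvALoop_eq_any, PySem.List.pyRange_one, htake, hq]
    simp only [List.map_append, List.map_cons, List.map_nil,
      PySem.List.pyGet?_neg_one_append_singleton, Option.getD_some, PySem.List.count_eq,
      pv_count_append_gt_one, pvPair]
    rw [Bool.eq_iff_iff]
    simp only [List.any_eq_true, List.any_map, Function.comp, Bool.or_eq_true,
      decide_eq_true_eq, List.mem_map, List.mem_range, Int.sub_zero, ← hn, or_assoc]
    have hmem := pv_take_mem state n (by omega)
    constructor
    · rintro ⟨k, hk, hhit⟩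
      obtain ⟨p, hp, hpat⟩ := hpok k hk
      have hb : state[k]'(by omega) ∈ state.take n := (hmem _).mpr ⟨k, hk, rfl⟩
      simp only [pvHit, Bool.or_eq_true, beq_iff_eq, hqat,
        show ((0:Int) + (k:Int)) = (k:Int) by omega, hpat] at hhit
      rcases hhit with (hcol | hrow) | hdiag
      · exact Or.inl ⟨_, hb, by simp [hp, hcol]⟩
      · exact Or.inr (Or.inl ⟨_, hb, by simp [hp, hrow]⟩)
      · have : pvOrd p.1 + pvIntOf p.2 = pvOrd q.1 + pvIntOf q.2 ∨
               pvOrd p.1 - pvIntOf p.2 = pvOrd q.1 - pvIntOf q.2 := by omega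
        rcases this with hs | hd
        · exact Or.inr (Or.inr (Or.inl ⟨_, hb, by simp [hp, hs]⟩))
        · exact Or.inr (Or.inr (Or.inr ⟨_, hb, by simp [hp, hd]⟩))
    · rintro (⟨b, hb, hkey⟩ | ⟨b, hb, hkey⟩ | ⟨b, hb, hkey⟩ | ⟨b, hb, hkey⟩) <;>
      · obtain ⟨k, hk, rfl⟩ := (hmem _).mp hb
        obtain ⟨p, hp, hpat⟩ := hpok k hk
        refine ⟨k, hk, ?_⟩
        simp only [pvHit, Bool.or_eq_true, beq_iff_eq, hqat,
          show ((0:Int) + (k:Int)) = (k:Int) by omega, hpat]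
        simp only [hp, Option.getD_some] at hkey
        first
        | exact Or.inl (Or.inl hkey)
        | exact Or.inl (Or.inr hkey)
        | exact Or.inr (by omega)
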